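-- pv_equiv track=rewrite | github.com/Code-W4YN3/Codility-Tests | first-letter-problem/first-letter.py | first_letter
-- ===== SOURCE A (Python) =====
-- def first_letter(S):
--     count = 0
--     for i in range(len(S)):
--         swapped = S[1:] + S[0]
--         S = swapped
--         if(swapped[-1] == swapped[0]):
--             count += 1
--     return count
-- ===== SOURCE B (Python) =====
-- def first_letter(S):
--     n = len(S)
--     return sum(1 for i in range(n) if S[i] == S[(i + 1) % n])
-- ===== Notes on version B (the rewrite author's own statement) =====
-- stated objective: faster
-- what changed: Replaced the loop that rebuilds a rotated copy of the whole string on every iteration with a single indexed pass comparing S[i] to S[(i+1)%n].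
import Mathlib
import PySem

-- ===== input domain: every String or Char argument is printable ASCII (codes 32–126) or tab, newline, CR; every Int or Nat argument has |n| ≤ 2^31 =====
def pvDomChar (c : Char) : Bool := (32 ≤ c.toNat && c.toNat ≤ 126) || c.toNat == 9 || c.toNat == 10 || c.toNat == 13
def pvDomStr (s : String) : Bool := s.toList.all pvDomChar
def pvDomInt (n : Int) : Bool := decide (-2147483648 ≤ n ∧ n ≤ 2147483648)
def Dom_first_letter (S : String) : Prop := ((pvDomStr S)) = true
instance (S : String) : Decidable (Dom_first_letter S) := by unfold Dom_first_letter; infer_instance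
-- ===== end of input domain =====

-- B replaces A's per-iteration whole-string rotation with one indexed pass comparing S[i] to S[(i+1)%n]; objective: faster (asymptotic).

-- ===== PORT A =====
-- one loop iteration: swapped = S[1:] + S[0]; S = swapped; if swapped[-1] == swapped[0]: count += 1
def first_letter_step (st : List Char × Int) (_i : Nat) : List Char × Int :=
  let swapped := PySem.List.slice st.1 (some 1) none ++ (PySem.List.pyGet? st.1 0).toList
  (swapped,
   if PySem.List.pyGet? swapped (-1) == PySem.List.pyGet? swapped 0 then st.2 + 1 else st.2)

def first_letter (S : String) : Int :=
  ((List.range S.toList.length).foldl first_letter_step (S.toList, 0)).2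

-- ===== PORT B =====
def first_letter_alt (S : String) : Int :=
  let l := S.toList
  let n : Int := l.length
  (PySem.List.pyRange 0 n 1).foldl
    (fun acc i =>
      if PySem.List.pyGet? l i == PySem.List.pyGet? l (PySem.Int.mod (i + 1) n) then acc + 1
      else acc) 0

-- ===== PRECONDITION & SPEC =====
def Spec_first_letter (S : String) (out : Int) : Prop := out = first_letter_alt S
instance (S : String) (out : Int) : Decidable (Spec_first_letter S out) := by unfold Spec_first_letter; infer_instance

-- ===== CLAIM (what is proved, stated in full; the proofs are below) =====
def Claim_equal_first_letter : Prop := ∀ (S : String), Dom_first_letter S → Spec_first_letter S (first_letter S)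

-- ===== LEMMAS AND PROOFS =====

def pvCond (l : List Char) (i : Nat) : Bool := l[i % l.length]? == l[(i + 1) % l.length]?

theorem pv_invA (l : List Char) (hl : l ≠ []) (k : Nat) :
    (List.range k).foldl first_letter_step (l, 0) =
      (l.rotate k, ((List.range k).countP (pvCond l) : Int)) := by
  have hlen : 0 < l.length := List.length_pos_iff.mpr hl
  induction k with
  | zero => simp [List.rotate]
  | succ k ih =>
      rw [List.range_succ, List.foldl_append, ih]
      have hsne : l.rotate k ≠ [] := by
        simpa using (List.rotate_eq_nil_iff (l := l) (n := k)).ne.mpr hl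
      obtain ⟨a, t, hs⟩ := List.exists_cons_of_ne_nil hsne
      have hswap : PySem.List.slice (l.rotate k) (some 1) none ++
          (PySem.List.pyGet? (l.rotate k) 0).toList = l.rotate (k + 1) := by
        rw [hs, ← List.rotate_rotate l k 1, hs]
        simp [PySem.List.slice_from_one, List.rotate_cons_succ]
      have hlast : (l.rotate (k + 1)).getLast? = l[k % l.length]? := by
        rw [← List.rotate_rotate l k 1, hs, List.rotate_cons_succ, List.rotate_zero,
          List.getLast?_concat]
        have h0 : (l.rotate k)[0]? = l[(0 + k) % l.length]? :=
          List.getElem?_rotate hlen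
        rw [hs] at h0
        simpa using h0
      have hhead : (l.rotate (k + 1))[0]? = l[(k + 1) % l.length]? := by
        have h0 : (l.rotate (k + 1))[0]? = l[(0 + (k + 1)) % l.length]? :=
          List.getElem?_rotate hlen
        simpa using h0
      simp only [List.foldl_cons, List.foldl_nil, first_letter_step, hswap]
      rw [PySem.List.pyGet?_neg_one, PySem.List.pyGet?_zero, hlast, hhead,
        List.countP_append]
      simp only [List.countP_cons, List.countP_nil, pvCond]
      by_cases h : (l[k % l.length]? == l[(k + 1) % l.length]?) = true
      · simp [h]
      · simp [h]

theorem pv_altB (S : String) (hl : S.toList ≠ []) :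
    first_letter_alt S = ((List.range S.toList.length).countP (pvCond S.toList) : Int) := by
  have hlen : 0 < S.toList.length := List.length_pos_iff.mpr hl
  unfold first_letter_alt
  show (PySem.List.pyRange 0 (S.toList.length : Int) 1).foldl
      (fun acc i =>
        if PySem.List.pyGet? S.toList i ==
            PySem.List.pyGet? S.toList (PySem.Int.mod (i + 1) (S.toList.length : Int))
        then acc + 1 else acc) 0 = _
  rw [PySem.List.pyRange_one, List.foldl_map]
  have hcongr : ∀ (acc : Int) (k : Nat), k ∈ List.range ((((S.toList.length : Int)) - 0).toNat) →
      (if PySem.List.pyGet? S.toList ((0 : Int) + k) ==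
          PySem.List.pyGet? S.toList (PySem.Int.mod (((0 : Int) + k) + 1) (S.toList.length : Int))
       then acc + 1 else acc) =
      (if pvCond S.toList k then acc + 1 else acc) := by
    intro acc k hk
    have hk' : k < S.toList.length := by simpa using hk
    have h1 : PySem.List.pyGet? S.toList ((0 : Int) + k) = S.toList[k % S.toList.length]? := by
      rw [Nat.mod_eq_of_lt hk']
      simpa using PySem.List.pyGet?_natCast S.toList k
    have h2 : PySem.Int.mod (((0 : Int) + k) + 1) (S.toList.length : Int) =
        (((k + 1) % S.toList.length : Nat) : Int) := by
      have he : ((0 : Int) + k) + 1 = ((k + 1 : Nat) : Int) := by push_cast; ring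
      rw [he, PySem.Int.mod_eq_emod_of_pos (by exact_mod_cast hlen)]
      push_cast
      omega
    have h3 : PySem.List.pyGet? S.toList
          (PySem.Int.mod (((0 : Int) + k) + 1) (S.toList.length : Int)) =
        S.toList[(k + 1) % S.toList.length]? := by
      rw [h2]; exact PySem.List.pyGet?_natCast S.toList _
    rw [h1, h3]; rfl
  have hrw := PySem.List.foldl_congr_mem
      (l := List.range (((S.toList.length : Int)) - 0).toNat) (init := (0 : Int))
      (f := fun acc (i : Nat) =>
        if PySem.List.pyGet? S.toList ((0 : Int) + i) ==
            PySem.List.pyGet? S.toList (PySem.Int.mod (((0 : Int) + i) + 1) (S.toList.length : Int))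
        then acc + 1 else acc)
      (g := fun acc (k : Nat) => if pvCond S.toList k then acc + 1 else acc)
      hcongr
  rw [hrw, PySem.List.foldl_if_add_one]
  simp

-- ===== VERDICT (by name: the statement is the Claim_ definition above) =====
theorem first_letter_spec : Claim_equal_first_letter := by
  intro S _
  unfold Spec_first_letter
  by_cases hl : S.toList = []
  · simp [first_letter, first_letter_alt, hl]
  · rw [first_letter, pv_invA S.toList hl S.toList.length, pv_altB S hl]
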